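-- pv_equiv track=rewrite | github.com/hahaclassic/courses | 05-algorithm-analysis/02_winograd_matrix_mult/src/matrix.py | create_precomp_column_opt
-- ===== SOURCE A (Python) =====
-- def create_precomp_column_opt(m2: list[list[int]]) -> list[int]:
--     m2_cols, m2_half_rows = len(m2[0]), len(m2) >> 1
--     mul_cols = [0] * m2_cols
--
--     for j in range(m2_half_rows):
--         mul_cols[0] += m2[j << 1][0] * m2[(j << 1) + 1][0]
--     for i in range(1, m2_cols):
--         for j in range(m2_half_rows):
--             mul_cols[i] += m2[j << 1][i] * m2[(j << 1) + 1][i]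
--
--     return mul_cols
-- ===== SOURCE B (Python) =====
-- def create_precomp_column_opt(m2: list[list[int]]) -> list[int]:
--     mul_cols = [0] * len(m2[0])
--     it = iter(m2)
--     for r1, r2 in zip(it, it):
--         mul_cols = [s + a * b for s, a, b in zip(mul_cols, r1, r2)]
--     return mul_cols
-- ===== Notes on version B (the rewrite author's own statement) =====
-- stated objective: idiomatic
-- what changed: Replaces the index-arithmetic loops (special-cased column 0, then columns-outer/row-pairs-inner with shifts and in-place element updates) by one pass over consecutive row pairs taken with zip(it, it), rebuilding the accumulator with a zip comprehension and no index arithmetic at all.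
import Mathlib
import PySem

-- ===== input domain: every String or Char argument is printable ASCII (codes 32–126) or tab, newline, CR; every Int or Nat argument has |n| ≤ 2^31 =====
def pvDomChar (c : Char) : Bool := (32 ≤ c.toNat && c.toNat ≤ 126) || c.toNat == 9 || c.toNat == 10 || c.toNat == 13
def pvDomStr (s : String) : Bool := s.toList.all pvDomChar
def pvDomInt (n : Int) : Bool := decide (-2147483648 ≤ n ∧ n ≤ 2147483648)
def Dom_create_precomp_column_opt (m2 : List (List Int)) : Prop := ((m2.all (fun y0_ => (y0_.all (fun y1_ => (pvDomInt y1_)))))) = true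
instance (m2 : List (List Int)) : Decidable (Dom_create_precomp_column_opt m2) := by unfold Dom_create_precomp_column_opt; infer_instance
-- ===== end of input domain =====

-- B replaces A's index-arithmetic loops (special-cased column 0, columns-outer/row-pairs-inner)
-- by one pass over consecutive row pairs with a zip-comprehension accumulator (objective: idiomatic).

-- ===== PORT A =====
-- m2[0], m2[j<<1][i], m2[(j<<1)+1][i] and mul_cols[i] are in range on every input admitted by
-- Pre_ below; List.getD is exact there (Python raises IndexError exactly outside Pre_).
def create_precomp_column_opt (m2 : List (List Int)) : List Int :=
  let m2_cols := (m2.getD 0 []).length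
  let m2_half_rows := m2.length / 2
  let mul1 := (List.range m2_half_rows).foldl
    (fun mc j => mc.set 0 (mc.getD 0 0 + (m2.getD (2*j) []).getD 0 0 * (m2.getD (2*j+1) []).getD 0 0))
    (List.replicate m2_cols 0)
  (List.range' 1 (m2_cols - 1)).foldl
    (fun mc i => (List.range m2_half_rows).foldl
      (fun mc2 j => mc2.set i (mc2.getD i 0 + (m2.getD (2*j) []).getD i 0 * (m2.getD (2*j+1) []).getD i 0))
      mc)
    mul1

-- ===== PORT B =====
-- zip(it, it) over one list iterator yields the consecutive disjoint pairs; PySem has no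
-- iterator primitive, so that pairing is ported by hand (exact for lists):
def pvPairs {α : Type} : List α → List (α × α)
  | a :: b :: rest => (a, b) :: pvPairs rest
  | _ => []

-- zip of three lists is ported as the nested zip (Lean's zip truncates like Python's).
def create_precomp_column_opt_alt (m2 : List (List Int)) : List Int :=
  let init := List.replicate (m2.getD 0 []).length (0 : Int)
  (pvPairs m2).foldl
    (fun mc p => (mc.zip (p.1.zip p.2)).map (fun q => q.1 + q.2.1 * q.2.2)) init

-- ===== PRECONDITION & SPEC =====
-- Pre_ is exactly the inputs on which the Python A returns: m2 nonempty (else len(m2[0]) raises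
-- IndexError), a nonempty first row when at least one row pair exists (else mul_cols[0] raises),
-- and every paired row at least as long as the first row (else m2[...][i] raises).
def Pre_create_precomp_column_opt (m2 : List (List Int)) : Prop :=
  m2 ≠ [] ∧ (2 ≤ m2.length → (m2.getD 0 []).length ≠ 0) ∧
  ∀ r ∈ m2.take (2 * (m2.length / 2)), (m2.getD 0 []).length ≤ r.length
instance (m2 : List (List Int)) : Decidable (Pre_create_precomp_column_opt m2) := by
  unfold Pre_create_precomp_column_opt; infer_instance

def pvWitness_create_precomp_column_opt : List (List Int) := [[1, 2], [3, 4]]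

def Spec_create_precomp_column_opt (m2 : List (List Int)) (out : List Int) : Prop := out = create_precomp_column_opt_alt m2
instance (m2 : List (List Int)) (out : List Int) : Decidable (Spec_create_precomp_column_opt m2 out) := by unfold Spec_create_precomp_column_opt; infer_instance

-- ===== CLAIM (what is proved, stated in full; the proofs are below) =====
def Claim_equal_create_precomp_column_opt : Prop := ∀ (m2 : List (List Int)), Dom_create_precomp_column_opt m2 → Pre_create_precomp_column_opt m2 → Spec_create_precomp_column_opt m2 (create_precomp_column_opt m2)

-- ===== LEMMAS AND PROOFS =====

/-- The per-column value both programs compute: over each consecutive row pair, the sum of the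
paired products in column `i`. -/
def gcol (m2 : List (List Int)) (i : Nat) : Int :=
  ((List.range (m2.length / 2)).map
    (fun j => (m2.getD (2*j) []).getD i 0 * (m2.getD (2*j+1) []).getD i 0)).sum

/-- Folding `+= f j` at one fixed index is a single `set` of the summed increments. -/
theorem foldl_set_single (i : Nat) (f : Nat → Int) :
    ∀ (L : List Nat) (acc : List Int),
    L.foldl (fun a j => a.set i (a.getD i 0 + f j)) acc
      = acc.set i (acc.getD i 0 + (L.map f).sum) := by
  intro L
  induction L with
  | nil =>
    intro acc
    simp only [List.foldl_nil, List.map_nil, List.sum_nil, add_zero]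
    by_cases h : i < acc.length
    · rw [List.getD_eq_getElem acc 0 h, List.set_getElem_self]
    · exact (List.set_eq_of_length_le (by omega)).symm
  | cons x L ih =>
    intro acc
    by_cases h : i < acc.length
    · simp only [List.foldl_cons, ih, List.map_cons, List.sum_cons]
      rw [List.set_set]
      congr 1
      have : (acc.set i (acc.getD i 0 + f x)).getD i 0 = acc.getD i 0 + f x := by
        simp [List.getD_eq_getElem?_getD, h]
      rw [this]; ring
    · have hset : ∀ v : Int, acc.set i v = acc := by
        intro v; apply List.set_eq_of_length_le; omega
      simp only [List.foldl_cons, ih, hset]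

/-- Folding `+= g i` over the distinct indices `range' k n`: pointwise characterisation. -/
theorem foldl_set_range' (g : Nat → Int) :
    ∀ (n k : Nat) (acc : List Int),
    (((List.range' k n).foldl (fun a i => a.set i (a.getD i 0 + g i)) acc).length = acc.length)
    ∧ ∀ t : Nat, ((List.range' k n).foldl (fun a i => a.set i (a.getD i 0 + g i)) acc).getD t 0
        = if k ≤ t ∧ t < k + n ∧ t < acc.length then acc.getD t 0 + g t else acc.getD t 0 := by
  intro n
  induction n with
  | zero => intro k acc; simp [List.range'_zero]; intro t h1 h2; omega
  | succ n ih =>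
    intro k acc
    rw [List.range'_succ]
    simp only [List.foldl_cons]
    obtain ⟨ihl, ihp⟩ := ih (k+1) (acc.set k (acc.getD k 0 + g k))
    constructor
    · rw [ihl, List.length_set]
    · intro t
      rw [ihp t]
      by_cases hk : k < acc.length
      · have hgd : ∀ t', (acc.set k (acc.getD k 0 + g k)).getD t' 0
            = if t' = k then acc.getD k 0 + g k else acc.getD t' 0 := by
          intro t'
          by_cases ht' : t' = k
          · subst ht'; simp [List.getD_eq_getElem?_getD, hk]
          · rw [List.getD_eq_getElem?_getD, List.getElem?_set_ne (fun h => ht' h.symm), if_neg ht']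
            exact List.getD_eq_getElem?_getD.symm
        rw [List.length_set, hgd t]
        by_cases ht : t = k
        · subst ht
          rw [if_pos rfl, if_neg (by omega), if_pos ⟨le_refl _, by omega, hk⟩]
        · rw [if_neg ht]
          split_ifs <;> first | rfl | omega
      · have hset : acc.set k (acc.getD k 0 + g k) = acc := List.set_eq_of_length_le (by omega)
        rw [hset]
        split_ifs <;> first | rfl | omega

/-- A's result: the list whose `i`-th entry is `gcol m2 i`. -/
theorem A_char (m2 : List (List Int)) :
    create_precomp_column_opt m2
      = (List.range (m2.getD 0 []).length).map (fun i => gcol m2 i) := by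
  have e1 : create_precomp_column_opt m2
      = (List.range' 1 ((m2.getD 0 []).length - 1)).foldl
          (fun a i => a.set i (a.getD i 0 + gcol m2 i))
          ((List.replicate (m2.getD 0 []).length (0:Int)).set 0
            ((List.replicate (m2.getD 0 []).length (0:Int)).getD 0 0 + gcol m2 0)) := by
    have e0 : create_precomp_column_opt m2
        = (List.range' 1 ((m2.getD 0 []).length - 1)).foldl
            (fun mc i => (List.range (m2.length / 2)).foldl
              (fun mc2 j => mc2.set i (mc2.getD i 0 + (m2.getD (2*j) []).getD i 0 * (m2.getD (2*j+1) []).getD i 0))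
              mc)
            ((List.range (m2.length / 2)).foldl
              (fun mc j => mc.set 0 (mc.getD 0 0 + (m2.getD (2*j) []).getD 0 0 * (m2.getD (2*j+1) []).getD 0 0))
              (List.replicate (m2.getD 0 []).length 0)) := rfl
    rw [e0, foldl_set_single]
    have hbody : (fun (mc : List Int) (i : Nat) => (List.range (m2.length/2)).foldl
          (fun mc2 j => mc2.set i (mc2.getD i 0 + (m2.getD (2*j) []).getD i 0 * (m2.getD (2*j+1) []).getD i 0)) mc)
        = fun a i => a.set i (a.getD i 0 + gcol m2 i) := by
      funext mc i; rw [foldl_set_single]; rfl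
    rw [hbody]
    rfl
  rw [e1]
  set cols := (m2.getD 0 []).length with hc
  set mul1 := (List.replicate cols (0:Int)).set 0
      ((List.replicate cols (0:Int)).getD 0 0 + gcol m2 0) with hm
  obtain ⟨hlen, hpt⟩ := foldl_set_range' (gcol m2) (cols-1) 1 mul1
  have hm1len : mul1.length = cols := by rw [hm, List.length_set, List.length_replicate]
  apply List.ext_getElem
  · rw [hlen, hm1len, List.length_map, List.length_range]
  · intro t h1 h2
    have htc : t < cols := by rw [hlen, hm1len] at h1; exact h1
    have hget : ∀ (l : List Int) (h : t < l.length), l[t] = l.getD t 0 := by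
      intro l h; rw [List.getD_eq_getElem l 0 h]
    rw [hget _ h1, hpt t]
    have hrep : ∀ u : Nat, (List.replicate cols (0:Int)).getD u 0 = 0 := by
      intro u; rw [List.getD_eq_getElem?_getD, List.getElem?_replicate]
      split_ifs <;> rfl
    have hmt : mul1.getD t 0 = if t = 0 then gcol m2 0 else 0 := by
      by_cases ht : t = 0
      · subst ht
        rw [hm, if_pos rfl, List.getD_eq_getElem?_getD, List.getElem?_set_self, hrep 0, zero_add]
        · rfl
        · rw [List.length_replicate]; exact htc
      · rw [hm, List.getD_eq_getElem?_getD, List.getElem?_set_ne (fun h => ht h.symm), if_neg ht]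
        exact List.getD_eq_getElem?_getD.symm.trans (hrep t)
    rw [List.getElem_map, List.getElem_range]
    by_cases ht : t = 0
    · subst ht
      rw [if_neg (by omega), hmt, if_pos rfl]
    · rw [if_pos ⟨by omega, by omega, by omega⟩, hmt, if_neg ht]
      ring

/-- The consecutive disjoint pairs are the index pairs `(2j, 2j+1)` for `j < len/2`. -/
theorem pvPairs_eq (xs : List (List Int)) :
    pvPairs xs = (List.range (xs.length / 2)).map
      (fun j => (xs.getD (2*j) [], xs.getD (2*j+1) [])) := by
  induction xs using pvPairs.induct with
  | case1 a b rest ih =>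
    have hlen : (a :: b :: rest).length / 2 = rest.length / 2 + 1 := by
      simp [List.length_cons]; omega
    rw [pvPairs, hlen, List.range_succ_eq_map, List.map_cons, List.map_map, ih]
    congr 1
  | case2 xs h =>
    rcases xs with _ | ⟨a, _ | ⟨b, t⟩⟩
    · rfl
    · simp [pvPairs]
    · exact absurd rfl (h a b t)

/-- One zip-comprehension step, as a map over the column indices. -/
theorem zip3_map : ∀ (mc r1 r2 : List Int), mc.length ≤ r1.length → mc.length ≤ r2.length →
    (mc.zip (r1.zip r2)).map (fun q => q.1 + q.2.1 * q.2.2)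
      = (List.range mc.length).map (fun t => mc.getD t 0 + r1.getD t 0 * r2.getD t 0) := by
  intro mc
  induction mc with
  | nil => intro r1 r2 _ _; rfl
  | cons s mc ih =>
    intro r1 r2 h1 h2
    match r1, r2, h1, h2 with
    | a :: r1, b :: r2, h1, h2 =>
      simp only [List.length_cons, List.range_succ_eq_map, List.zip_cons_cons, List.map_cons,
        List.map_map]
      rw [ih r1 r2 (by simpa using h1) (by simpa using h2)]
      congr 1

/-- B's fold over the first `n` row pairs: the running column sums. -/
theorem B_fold (m2 : List (List Int)) (cols : Nat) :
    ∀ n : Nat, (∀ j, j < n → cols ≤ (m2.getD (2*j) []).length ∧ cols ≤ (m2.getD (2*j+1) []).length) →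
    (List.range n).foldl
        (fun mc j => (mc.zip ((m2.getD (2*j) []).zip (m2.getD (2*j+1) []))).map
          (fun q => q.1 + q.2.1 * q.2.2))
        (List.replicate cols 0)
      = (List.range cols).map
          (fun t => ((List.range n).map
            (fun j => (m2.getD (2*j) []).getD t 0 * (m2.getD (2*j+1) []).getD t 0)).sum) := by
  intro n
  induction n with
  | zero => simp [List.map_const']
  | succ n ih =>
    intro h
    rw [List.range_succ, List.foldl_append, List.foldl_cons, List.foldl_nil,
      ih (fun j hj => h j (by omega))]
    obtain ⟨ha, hb⟩ := h n (by omega)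
    set F := fun t : Nat => ((List.range n).map
      (fun j => (m2.getD (2*j) []).getD t 0 * (m2.getD (2*j+1) []).getD t 0)).sum with hF
    have hmlen : ((List.range cols).map F).length = cols := by
      rw [List.length_map, List.length_range]
    rw [zip3_map _ _ _ (by rw [hmlen]; exact ha) (by rw [hmlen]; exact hb), hmlen]
    apply List.map_congr_left
    intro t ht
    rw [List.mem_range] at ht
    have hget : ((List.range cols).map F).getD t 0 = F t := by
      rw [List.getD_eq_getElem?_getD, List.getElem?_map, List.getElem?_range ht]
      rfl
    rw [hget, hF, List.map_append, List.sum_append]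
    simp

/-- B's result: the same list of per-column pair sums. -/
theorem B_char (m2 : List (List Int))
    (hlen : ∀ r ∈ m2.take (2 * (m2.length / 2)), (m2.getD 0 []).length ≤ r.length) :
    create_precomp_column_opt_alt m2
      = (List.range (m2.getD 0 []).length).map (fun i => gcol m2 i) := by
  have hhalf : 2 * (m2.length / 2) ≤ m2.length := by omega
  have hmem : ∀ i : Nat, i < 2 * (m2.length / 2) → (m2.getD 0 []).length ≤ (m2.getD i []).length := by
    intro i hi
    have hil : i < m2.length := by omega
    rw [List.getD_eq_getElem _ _ hil]
    apply hlen
    have hlt : i < (m2.take (2 * (m2.length / 2))).length := by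
      rw [List.length_take]; omega
    have := List.getElem_take (xs := m2) (i := i) (j := 2 * (m2.length / 2)) (h := hlt)
    rw [← this]
    exact List.getElem_mem hlt
  have e0 : create_precomp_column_opt_alt m2
      = (pvPairs m2).foldl
          (fun mc p => (mc.zip (p.1.zip p.2)).map (fun q => q.1 + q.2.1 * q.2.2))
          (List.replicate (m2.getD 0 []).length 0) := rfl
  rw [e0, pvPairs_eq, List.foldl_map]
  exact B_fold m2 (m2.getD 0 []).length (m2.length / 2)
    (fun j hj => ⟨hmem (2*j) (by omega), hmem (2*j+1) (by omega)⟩)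

-- ===== VERDICT (by name: the statement is the Claim_ definition above) =====
theorem create_precomp_column_opt_spec : Claim_equal_create_precomp_column_opt := by
  intro m2 _ hpre
  unfold Spec_create_precomp_column_opt
  rw [A_char m2, B_char m2 hpre.2.2]
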